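-- pv_equiv track=rewrite | github.com/robinlan/Example-Codes-and-Learning-Tools | Python for Bioinformatics/pysrc/miner.py | FiveLetterDict
-- ===== SOURCE A (Python) =====
-- def FiveLetterDict( txt ):
--     dct = { }
--     work = txt.split()
--     for i in range( len( work )):
--         wd = work[i]
--         if len(wd)>=5:
--             wd5 = wd[:5]
--             if wd5 in dct:
--                 dct[wd5].append( i )
--             else:
--                 dct[wd5] = [i]
--     return dct
-- ===== SOURCE B (Python) =====
-- def FiveLetterDict(txt):
--     pairs = [(wd[:5], i) for i, wd in enumerate(txt.split()) if len(wd) >= 5]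
--     keys = list(dict.fromkeys(p for p, _ in pairs))
--     return {k: [i for p, i in pairs if p == k] for k in keys}
-- ===== Notes on version B (the rewrite author's own statement) =====
-- stated objective: alternative
-- what changed: B replaces A's single-pass mutable-dict loop (membership test, append-or-create) with a pure pipeline: a comprehension of (prefix,index) pairs, an ordered dedup of the prefixes via dict.fromkeys, then one collecting comprehension per distinct prefix.
import Mathlib
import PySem

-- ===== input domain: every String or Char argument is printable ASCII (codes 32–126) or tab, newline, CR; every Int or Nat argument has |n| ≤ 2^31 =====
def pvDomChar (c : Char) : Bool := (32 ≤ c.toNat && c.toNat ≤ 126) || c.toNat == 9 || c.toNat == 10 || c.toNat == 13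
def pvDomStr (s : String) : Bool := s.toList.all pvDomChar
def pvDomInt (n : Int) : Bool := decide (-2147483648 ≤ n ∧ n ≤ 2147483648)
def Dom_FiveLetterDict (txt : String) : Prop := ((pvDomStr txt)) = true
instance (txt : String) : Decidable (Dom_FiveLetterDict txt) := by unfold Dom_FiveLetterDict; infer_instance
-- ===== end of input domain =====

-- B rebuilds the dict as a pure pipeline (pair comprehension, ordered dedup of prefixes, one collecting pass per prefix) instead of A's single mutable-dict loop; same result, no speed claim.

-- ===== PORT A =====
def FiveLetterDict (txt : String) : List (String × List Int) :=
  let work := PySem.Str.split₀ txt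
  let dct := (PySem.List.pyRange 0 (PySem.List.len work)).foldl
    (fun d i =>
      let wd := PySem.List.pyGetD work i ""
      if 5 ≤ PySem.Str.len wd then
        let wd5 := PySem.Str.slice wd none (some 5)
        if d.contains wd5 then d.modify wd5 [] (fun l => l ++ [i])
        else d.insert wd5 [i]
      else d)
    PySem.Dict.empty
  dct.items

-- ===== PORT B =====
def FiveLetterDict_alt (txt : String) : List (String × List Int) :=
  let pairs := ((PySem.List.enumerate (PySem.Str.split₀ txt)).filter
      (fun p => 5 ≤ PySem.Str.len p.2)).map
      (fun p => (PySem.Str.slice p.2 none (some 5), p.1))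
  let keys := PySem.List.dedup (pairs.map (fun q => q.1))
  keys.map (fun k => (k, (pairs.filter (fun q => q.1 == k)).map (fun q => q.2)))

-- ===== PRECONDITION & SPEC =====
def Spec_FiveLetterDict (txt : String) (out : List (String × List Int)) : Prop := out = FiveLetterDict_alt txt
instance (txt : String) (out : List (String × List Int)) : Decidable (Spec_FiveLetterDict txt out) := by unfold Spec_FiveLetterDict; infer_instance

-- ===== CLAIM (what is proved, stated in full; the proofs are below) =====
def Claim_equal_FiveLetterDict : Prop := ∀ (txt : String), Dom_FiveLetterDict txt → Spec_FiveLetterDict txt (FiveLetterDict txt)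

-- ===== LEMMAS AND PROOFS =====

-- A's index loop rewritten as a fold over enumerate, with the append-or-create branch fused into Dict.modify.
theorem FiveLetterDict_loop (w : List String) :
    ((PySem.List.pyRange 0 (PySem.List.len w)).foldl
      (fun d i =>
        let wd := PySem.List.pyGetD w i ""
        if 5 ≤ PySem.Str.len wd then
          let wd5 := PySem.Str.slice wd none (some 5)
          if d.contains wd5 then d.modify wd5 [] (fun l => l ++ [i])
          else d.insert wd5 [i]
        else d)
      (PySem.Dict.empty : PySem.Dict String (List Int))) =
    ((((PySem.List.enumerate w).filter (fun p => 5 ≤ PySem.Str.len p.2)).map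
          (fun p => (PySem.Str.slice p.2 none (some 5), p.1))).foldl
      (fun d q => d.modify q.1 [] (fun l => l ++ [q.2])) PySem.Dict.empty) := by
  have h1 : ((PySem.List.pyRange 0 (PySem.List.len w)).foldl
      (fun d i =>
        let wd := PySem.List.pyGetD w i ""
        if 5 ≤ PySem.Str.len wd then
          let wd5 := PySem.Str.slice wd none (some 5)
          if d.contains wd5 then d.modify wd5 [] (fun l => l ++ [i])
          else d.insert wd5 [i]
        else d)
      (PySem.Dict.empty : PySem.Dict String (List Int)))
      = (PySem.List.enumerate w).foldl
        (fun d p =>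
          if 5 ≤ PySem.Str.len p.2 then
            if d.contains (PySem.Str.slice p.2 none (some 5)) then
              d.modify (PySem.Str.slice p.2 none (some 5)) [] (fun l => l ++ [p.1])
            else d.insert (PySem.Str.slice p.2 none (some 5)) [p.1]
          else d)
        PySem.Dict.empty := by
    rw [PySem.List.enumerate_eq_map_pyRange w "", List.foldl_map]
  rw [h1, List.foldl_map]
  rw [← PySem.List.foldl_ite_eq_foldl_filter (p := fun p : Int × String => 5 ≤ PySem.Str.len p.2)
      (f := fun d p => PySem.Dict.modify d (PySem.Str.slice p.2 none (some 5)) [] (fun l => l ++ [p.1]))]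
  apply PySem.List.foldl_congr_mem
  intro acc p _
  by_cases h : acc.contains (PySem.Str.slice p.2 none (some 5))
  · simp [h, PySem.Dict.modify]
  · simp [h, PySem.Dict.modify, PySem.Dict.getD_of_not_contains _ _ (by simpa using h)]

-- items of the grouping fold = ordered-dedup keys paired with their filtered indices (B's shape).
theorem FiveLetterDict_items (pairs : List (String × Int)) :
    ((pairs.foldl (fun d q => d.modify q.1 [] (fun l => l ++ [q.2])) PySem.Dict.empty).items)
    = (PySem.List.dedup (pairs.map (fun q => q.1))).map
        (fun k => (k, (pairs.filter (fun q => q.1 == k)).map (fun q => q.2))) := by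
  have hnd : ((pairs.foldl (fun d q => d.modify q.1 [] (fun l => l ++ [q.2]))
      (PySem.Dict.empty : PySem.Dict String (List Int))).keys).Nodup :=
    PySem.Dict.nodup_keys_foldl_modify_key pairs (fun q => q.1) [] (fun _ q => fun l => l ++ [q.2])
      PySem.Dict.empty (by simp)
  rw [PySem.Dict.items_eq_map_keys _ hnd []]
  rw [PySem.Dict.keys_foldl_modify_key pairs (fun q => q.1) [] (fun _ q => fun l => l ++ [q.2])]
  have hkeys : PySem.Set.update (PySem.Dict.empty : PySem.Dict String (List Int)).keys
      (pairs.map (fun q => q.1)) = PySem.List.dedup (pairs.map (fun q => q.1)) := by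
    simp [PySem.Set.update, PySem.Set.ofList_eq_foldl]
  rw [hkeys]
  apply List.map_congr_left
  intro k _
  rw [PySem.Dict.getD_foldl_modify_append]
  simp

-- ===== VERDICT (by name: the statement is the Claim_ definition above) =====
theorem FiveLetterDict_main (w : List String) :
    ((PySem.List.pyRange 0 (PySem.List.len w)).foldl
      (fun d i =>
        let wd := PySem.List.pyGetD w i ""
        if 5 ≤ PySem.Str.len wd then
          let wd5 := PySem.Str.slice wd none (some 5)
          if d.contains wd5 then d.modify wd5 [] (fun l => l ++ [i])
          else d.insert wd5 [i]
        else d)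
      (PySem.Dict.empty : PySem.Dict String (List Int))).items =
    (PySem.List.dedup
        ((((PySem.List.enumerate w).filter (fun p => 5 ≤ PySem.Str.len p.2)).map
          (fun p => (PySem.Str.slice p.2 none (some 5), p.1))).map (fun q => q.1))).map
      (fun k => (k, (((((PySem.List.enumerate w).filter (fun p => 5 ≤ PySem.Str.len p.2)).map
          (fun p => (PySem.Str.slice p.2 none (some 5), p.1))).filter (fun q => q.1 == k)).map (fun q => q.2)))) := by
  rw [FiveLetterDict_loop w]
  exact FiveLetterDict_items _

theorem FiveLetterDict_spec : Claim_equal_FiveLetterDict := by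
  intro txt _
  show FiveLetterDict txt = FiveLetterDict_alt txt
  unfold FiveLetterDict FiveLetterDict_alt
  exact FiveLetterDict_main (PySem.Str.split₀ txt)
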